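-- pv_equiv track=rewrite | github.com/Lichess4545/litour | heltour/tournament_core/knockout.py | _build_standard_bracket_positions
-- ===== SOURCE A (Python) =====
-- from typing import List, Optional, Tuple
--
-- def _build_standard_bracket_positions(num_matches: int) -> List[int]:
--     """Build the standard tournament bracket positions.
--
--     This implements the specific bracket ordering requested:
--     1v32, 16v17, 3v30, 14v19, 5v28, 12v21, 7v26, 10v23, 2v31, 15v18, 4v29, 13v20, 6v27, 11v22, 8v25, 9v24
--
--     Returns a list where index i contains the bracket position for traditional pairing i.
--     """
--     if num_matches <= 1:
--         return list(range(num_matches))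
--
--     if num_matches == 2:
--         # 4 teams: 1v4, 2v3 -> 1v4, 2v3 (keep order)
--         return [0, 1]
--     elif num_matches == 4:
--         # 8 teams: traditional order is 1v8, 2v7, 3v6, 4v5
--         # Requested bracket order: 1v8, 4v5, 3v6, 2v7
--         # So pairing 0(1v8)->pos 0, pairing 1(2v7)->pos 3, pairing 2(3v6)->pos 2, pairing 3(4v5)->pos 1
--         return [0, 3, 2, 1]
--     elif num_matches == 8:
--         # 16 teams: traditional order is 1v16, 2v15, 3v14, 4v13, 5v12, 6v11, 7v10, 8v9
--         # Apply similar pattern as 32-team but scaled down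
--         return [0, 7, 2, 5, 4, 3, 6, 1]
--     elif num_matches == 16:
--         # 32 teams: the exact requested pattern
--         # Traditional pairings: 1v32, 2v31, 3v30, 4v29, 5v28, 6v27, 7v26, 8v25, 9v24, 10v23, 11v22, 12v21, 13v20, 14v19, 15v18, 16v17
--         # Requested order:      1v32, 16v17, 3v30, 14v19, 5v28, 12v21, 7v26, 10v23, 2v31, 15v18, 4v29, 13v20, 6v27, 11v22, 8v25, 9v24
--
--         # Map traditional pairing index to bracket position:
--         # pairing 0 (1v32) -> position 0
--         # pairing 15 (16v17) -> position 1
--         # pairing 2 (3v30) -> position 2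
--         # pairing 13 (14v19) -> position 3
--         # pairing 4 (5v28) -> position 4
--         # pairing 11 (12v21) -> position 5
--         # pairing 6 (7v26) -> position 6
--         # pairing 9 (10v23) -> position 7
--         # pairing 1 (2v31) -> position 8
--         # pairing 14 (15v18) -> position 9
--         # pairing 3 (4v29) -> position 10
--         # pairing 12 (13v20) -> position 11
--         # pairing 5 (6v27) -> position 12
--         # pairing 10 (11v22) -> position 13
--         # pairing 7 (8v25) -> position 14
--         # pairing 8 (9v24) -> position 15
--
--         return [0, 8, 2, 10, 4, 12, 6, 14, 15, 7, 13, 5, 11, 3, 9, 1]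
--
--     # For other sizes, use recursive construction
--     half = num_matches // 2
--     first_half = _build_standard_bracket_positions(half)
--     second_half = _build_standard_bracket_positions(half)
--
--     # Combine the halves with proper offset
--     result = []
--     for pos in first_half:
--         result.append(pos)
--     for pos in second_half:
--         result.append(pos + half)
--
--     return result
-- ===== SOURCE B (Python) =====
-- _BASE_TABLES = {
--     2: [0, 1],
--     4: [0, 3, 2, 1],
--     8: [0, 7, 2, 5, 4, 3, 6, 1],
--     16: [0, 8, 2, 10, 4, 12, 6, 14, 15, 7, 13, 5, 11, 3, 9, 1],
-- }
--
--
-- def _build_standard_bracket_positions(num_matches: int):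
--     # Iterative bottom-up: record the chain of halvings once, then double the
--     # single shared half at each level (the two recursive halves are identical).
--     halves = []
--     n = num_matches
--     while n > 1 and n not in _BASE_TABLES:
--         halves.append(n // 2)
--         n = n // 2
--     if n in _BASE_TABLES:
--         result = list(_BASE_TABLES[n])
--     else:
--         result = list(range(n)) if n > 0 else []
--     for h in reversed(halves):
--         result = result + [p + h for p in result]
--     return result
-- ===== Notes on version B (the rewrite author's own statement) =====
-- stated objective: faster
-- what changed: Replaces the doubly-recursive construction (which recomputes the identical half twice per level) with an iterative bottom-up build: collect the halving chain once, then double the single shared half with an offset at each level.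
import Mathlib
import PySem

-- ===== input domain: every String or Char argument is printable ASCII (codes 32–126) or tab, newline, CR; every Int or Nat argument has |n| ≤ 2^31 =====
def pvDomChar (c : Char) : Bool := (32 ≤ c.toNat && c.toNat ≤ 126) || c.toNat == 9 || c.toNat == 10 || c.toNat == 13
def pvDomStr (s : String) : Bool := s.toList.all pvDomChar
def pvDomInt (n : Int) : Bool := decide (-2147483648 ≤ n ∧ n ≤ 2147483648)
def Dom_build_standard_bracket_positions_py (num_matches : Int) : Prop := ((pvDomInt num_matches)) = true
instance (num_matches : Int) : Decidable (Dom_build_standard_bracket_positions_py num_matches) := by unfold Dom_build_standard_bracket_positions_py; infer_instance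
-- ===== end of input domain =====

-- B replaces A's doubly-recursive construction by an iterative bottom-up doubling of one
-- shared half per level (objective: faster; the two recursive halves of A are identical).

-- ===== PORT A =====
def build_standard_bracket_positions_py (num_matches : Int) : List Int :=
  if num_matches ≤ 1 then (List.range num_matches.toNat).map Int.ofNat
  else if num_matches = 2 then [0, 1]
  else if num_matches = 4 then [0, 3, 2, 1]
  else if num_matches = 8 then [0, 7, 2, 5, 4, 3, 6, 1]
  else if num_matches = 16 then [0, 8, 2, 10, 4, 12, 6, 14, 15, 7, 13, 5, 11, 3, 9, 1]
  else
    let half := PySem.Int.floordiv num_matches 2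
    let first_half := build_standard_bracket_positions_py half
    let second_half := build_standard_bracket_positions_py half
    let result := first_half.foldl (fun r pos => r ++ [pos]) ([] : List Int)
    second_half.foldl (fun r pos => r ++ [pos + half]) result
termination_by num_matches.toNat
decreasing_by
  all_goals
    simp only [PySem.Int.floordiv_eq_ediv_of_pos (by omega : (0:Int) < 2)]
    omega

-- ===== PORT B =====
-- _BASE_TABLES as an association list (dict in insertion order)
def pvBaseTables : List (Int × List Int) :=
  [(2, [0, 1]), (4, [0, 3, 2, 1]), (8, [0, 7, 2, 5, 4, 3, 6, 1]),
   (16, [0, 8, 2, 10, 4, 12, 6, 14, 15, 7, 13, 5, 11, 3, 9, 1])]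

-- the while loop of Source B: collect the halving chain, return (halves, final n)
def pvAltCollect (n : Int) (halves : List Int) : List Int × Int :=
  if 1 < n ∧ pvBaseTables.lookup n = none then
    pvAltCollect (PySem.Int.floordiv n 2) (halves ++ [PySem.Int.floordiv n 2])
  else (halves, n)
termination_by n.toNat
decreasing_by
  simp only [PySem.Int.floordiv_eq_ediv_of_pos (by omega : (0:Int) < 2)]
  omega

def build_standard_bracket_positions_py_alt (num_matches : Int) : List Int :=
  let c := pvAltCollect num_matches []
  let result : List Int :=
    match pvBaseTables.lookup c.2 with
    | some t => t
    | none => if 0 < c.2 then (List.range c.2.toNat).map Int.ofNat else []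
  c.1.reverse.foldl (fun res h => res ++ res.map (· + h)) result

-- ===== PRECONDITION & SPEC =====
def Spec_build_standard_bracket_positions_py (num_matches : Int) (out : List Int) : Prop := out = build_standard_bracket_positions_py_alt num_matches
instance (num_matches : Int) (out : List Int) : Decidable (Spec_build_standard_bracket_positions_py num_matches out) := by unfold Spec_build_standard_bracket_positions_py; infer_instance

-- ===== CLAIM (what is proved, stated in full; the proofs are below) =====
def Claim_equal_build_standard_bracket_positions_py : Prop := ∀ (num_matches : Int), Dom_build_standard_bracket_positions_py num_matches → Spec_build_standard_bracket_positions_py num_matches (build_standard_bracket_positions_py num_matches)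

-- ===== LEMMAS AND PROOFS =====

lemma pvAltCollect_step (n : Int) (a : List Int) (h1 : 1 < n)
    (h2 : pvBaseTables.lookup n = none) :
    pvAltCollect n a = pvAltCollect (PySem.Int.floordiv n 2) (a ++ [PySem.Int.floordiv n 2]) := by
  rw [pvAltCollect]; simp [h1, h2]

lemma pvAltCollect_stop (n : Int) (a : List Int)
    (h : ¬ (1 < n ∧ pvBaseTables.lookup n = none)) :
    pvAltCollect n a = (a, n) := by
  rw [pvAltCollect]; simp only [h, if_false]

lemma pvLookup_none (n : Int) (h2 : n ≠ 2) (h4 : n ≠ 4) (h8 : n ≠ 8) (h16 : n ≠ 16) :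
    pvBaseTables.lookup n = none := by
  simp only [pvBaseTables, List.lookup]
  have e2 : (n == 2) = false := by simp [h2]
  have e4 : (n == 4) = false := by simp [h4]
  have e8 : (n == 8) = false := by simp [h8]
  have e16 : (n == 16) = false := by simp [h16]
  rw [e2, e4, e8, e16]

-- the accumulator of pvAltCollect only gets prepended
lemma pvAltCollect_acc : ∀ (k : Nat) (n : Int) (a : List Int), n.toNat = k →
    pvAltCollect n a = (a ++ (pvAltCollect n []).1, (pvAltCollect n []).2) := by
  intro k
  induction k using Nat.strong_induction_on with
  | _ k ih =>
    intro n a hk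
    by_cases hc : 1 < n ∧ pvBaseTables.lookup n = none
    · have hd : PySem.Int.floordiv n 2 = n / 2 :=
        PySem.Int.floordiv_eq_ediv_of_pos (by omega)
      have hlt : (PySem.Int.floordiv n 2).toNat < k := by omega
      rw [pvAltCollect_step n a hc.1 hc.2, pvAltCollect_step n [] hc.1 hc.2,
          ih _ hlt _ (a ++ [PySem.Int.floordiv n 2]) rfl,
          ih _ hlt _ ([] ++ [PySem.Int.floordiv n 2]) rfl]
      simp
    · rw [pvAltCollect_stop n a hc, pvAltCollect_stop n [] hc]
      simp

-- B satisfies A's recurrence on the recursive case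
lemma alt_step (n : Int) (h1 : 1 < n) (h2 : pvBaseTables.lookup n = none) :
    build_standard_bracket_positions_py_alt n =
      build_standard_bracket_positions_py_alt (PySem.Int.floordiv n 2) ++
        (build_standard_bracket_positions_py_alt (PySem.Int.floordiv n 2)).map
          (· + PySem.Int.floordiv n 2) := by
  unfold build_standard_bracket_positions_py_alt
  rw [pvAltCollect_step n [] h1 h2,
      pvAltCollect_acc (PySem.Int.floordiv n 2).toNat _ _ rfl]
  simp [List.foldl_append]

lemma main_eq : ∀ (k : Nat) (n : Int), n.toNat = k →
    build_standard_bracket_positions_py n = build_standard_bracket_positions_py_alt n := by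
  intro k
  induction k using Nat.strong_induction_on with
  | _ k ih =>
    intro n hk
    rw [build_standard_bracket_positions_py]
    by_cases hle : n ≤ 1
    · -- base: n <= 1, collect stops, lookup misses
      have hl : pvBaseTables.lookup n = none :=
        pvLookup_none n (by omega) (by omega) (by omega) (by omega)
      simp only [hle, if_true]
      unfold build_standard_bracket_positions_py_alt
      rw [pvAltCollect_stop n [] (by intro h; omega)]
      simp only [hl]
      by_cases hp : 0 < n
      · simp [hp]
      · have h0 : n.toNat = 0 := by omega
        simp [hp, h0]
    · by_cases h2 : n = 2
      · subst h2
        unfold build_standard_bracket_positions_py_alt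
        rw [pvAltCollect_stop 2 [] (by simp [pvBaseTables])]
        decide
      by_cases h4 : n = 4
      · subst h4
        unfold build_standard_bracket_positions_py_alt
        rw [pvAltCollect_stop 4 [] (by simp [pvBaseTables])]
        decide
      by_cases h8 : n = 8
      · subst h8
        unfold build_standard_bracket_positions_py_alt
        rw [pvAltCollect_stop 8 [] (by simp [pvBaseTables])]
        decide
      by_cases h16 : n = 16
      · subst h16
        unfold build_standard_bracket_positions_py_alt
        rw [pvAltCollect_stop 16 [] (by simp [pvBaseTables])]
        decide
      · simp only [hle, h2, h4, h8, h16, if_false]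
        have hlk : pvBaseTables.lookup n = none := pvLookup_none n h2 h4 h8 h16
        have hd : PySem.Int.floordiv n 2 = n / 2 :=
          PySem.Int.floordiv_eq_ediv_of_pos (by omega)
        have hrec := ih (PySem.Int.floordiv n 2).toNat (by omega) (PySem.Int.floordiv n 2) rfl
        rw [alt_step n (by omega) hlk]
        rw [PySem.List.foldl_append_singleton]
        rw [show (fun (r : List Int) (pos : Int) => r ++ [pos + PySem.Int.floordiv n 2]) =
              (fun (r : List Int) (pos : Int) =>
                r ++ [(fun p => p + PySem.Int.floordiv n 2) pos]) from rfl]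
        rw [PySem.List.foldl_append_singleton_eq_map]
        rw [hrec]
        simp

-- ===== VERDICT (by name: the statement is the Claim_ definition above) =====
theorem build_standard_bracket_positions_py_spec : Claim_equal_build_standard_bracket_positions_py := by
  intro n _
  exact main_eq n.toNat n rfl
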